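-- pv_equiv track=rewrite | github.com/brianrocknj/age-grade-calc | utils.py | getAllTimes
-- ===== SOURCE A (Python) =====
-- def getAllTimes(min=2, max=8):
--     timeValues = []
--     for h in range(min, max):
--         for m in range(0,60):
--             for s in range(0,60):
--                 if h == 0:
--                     t = f"{m:02}:{s:02}"
--                 else:
--                     t = f"{h:02}:{m:02}:{s:02}"
--
--                 timeValues.append(t)
--     return timeValues
-- ===== SOURCE B (Python) =====
-- def getAllTimes(min=2, max=8):
--     timeValues = []
--     for total in range(min * 3600, max * 3600):
--         h, rem = divmod(total, 3600)
--         m, s = divmod(rem, 60)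
--         parts = ([] if h == 0 else [str(h).zfill(2)]) + [str(m).zfill(2), str(s).zfill(2)]
--         timeValues.append(":".join(parts))
--     return timeValues
-- ===== Notes on version B (the rewrite author's own statement) =====
-- stated objective: alternative
-- what changed: Replaces the three nested h/m/s loops with one flat loop over total seconds in range(min*3600, max*3600), recovering the components with divmod and assembling each string as ':'.join of zfill-padded parts instead of branch-specific f-strings.
import Mathlib
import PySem

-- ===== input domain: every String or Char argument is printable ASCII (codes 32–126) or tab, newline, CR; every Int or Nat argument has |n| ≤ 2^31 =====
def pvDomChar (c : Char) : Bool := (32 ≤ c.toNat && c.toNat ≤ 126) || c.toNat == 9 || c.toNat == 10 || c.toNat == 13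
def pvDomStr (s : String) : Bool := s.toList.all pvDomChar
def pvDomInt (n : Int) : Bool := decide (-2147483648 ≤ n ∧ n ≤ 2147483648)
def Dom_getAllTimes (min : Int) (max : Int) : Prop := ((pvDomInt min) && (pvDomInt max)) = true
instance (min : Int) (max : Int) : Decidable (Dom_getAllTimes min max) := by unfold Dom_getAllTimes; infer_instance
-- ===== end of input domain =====

-- B replaces the three nested h/m/s formatting loops by one flat loop over total seconds, recovering the components with divmod and assembling each string as ':'.join of zfilled parts (alternative decomposition, same cost).


-- ===== PORT A =====
-- f"{n:02}" : zero-pad str(n) to width 2 (exact, also for negatives: the sign stays in front)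
def pvPad2 (n : Int) : List Char := PySem.Chars.zfill (PySem.Int.toChars n) 2

def getAllTimes (min : Int) (max : Int) : List String :=
  (PySem.List.pyRange min max).foldl (fun timeValues h =>
    (PySem.List.pyRange 0 60).foldl (fun timeValues m =>
      (PySem.List.pyRange 0 60).foldl (fun timeValues s =>
        timeValues ++ [if h = 0
          then String.ofList (pvPad2 m ++ ':' :: pvPad2 s)
          else String.ofList (pvPad2 h ++ ':' :: pvPad2 m ++ ':' :: pvPad2 s)]) timeValues) timeValues) []

-- ===== PORT B =====
def getAllTimes_alt (min : Int) (max : Int) : List String :=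
  (PySem.List.pyRange (min * 3600) (max * 3600)).foldl (fun timeValues total =>
    let h := PySem.Int.floordiv total 3600
    let rem := PySem.Int.mod total 3600
    let m := PySem.Int.floordiv rem 60
    let s := PySem.Int.mod rem 60
    let parts := (if h = 0 then [] else [PySem.Str.zfill (PySem.Int.toStr h) 2]) ++
      [PySem.Str.zfill (PySem.Int.toStr m) 2, PySem.Str.zfill (PySem.Int.toStr s) 2]
    timeValues ++ [PySem.Str.join ":" parts]) []

-- ===== PRECONDITION & SPEC =====
def Spec_getAllTimes (min : Int) (max : Int) (out : List String) : Prop := out = getAllTimes_alt min max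
instance (min : Int) (max : Int) (out : List String) : Decidable (Spec_getAllTimes min max out) := by unfold Spec_getAllTimes; infer_instance

-- ===== CLAIM (what is proved, stated in full; the proofs are below) =====
def Claim_equal_getAllTimes : Prop := ∀ (min : Int) (max : Int), Dom_getAllTimes min max → Spec_getAllTimes min max (getAllTimes min max)

-- ===== LEMMAS AND PROOFS =====

-- the time string B assembles from components h, m, s, as ':'.join of its parts
def pvJStr (h m s : Int) : String :=
  PySem.Str.join ":" ((if h = 0 then [] else [PySem.Str.zfill (PySem.Int.toStr h) 2]) ++
    [PySem.Str.zfill (PySem.Int.toStr m) 2, PySem.Str.zfill (PySem.Int.toStr s) 2])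

-- ':'.join of the zfilled parts is the string A formats directly
lemma pv_join_eq (h m s : Int) :
    pvJStr h m s = (if h = 0
      then String.ofList (pvPad2 m ++ ':' :: pvPad2 s)
      else String.ofList (pvPad2 h ++ ':' :: pvPad2 m ++ ':' :: pvPad2 s)) := by
  unfold pvJStr pvPad2
  split_ifs with h0 <;>
    simp [PySem.Str.join, PySem.Str.zfill, PySem.Int.toStr, PySem.Chars.join_cons_cons,
      PySem.Chars.join_singleton, String.toList_ofList]

-- shifting a unit-step range by a constant
lemma pv_pyRange_shift (c a b : Int) :
    PySem.List.pyRange (c + a) (c + b) = (PySem.List.pyRange a b).map (fun r => c + r) := by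
  obtain ⟨n, hn⟩ : ∃ n, (b - a).toNat = n := ⟨_, rfl⟩
  induction n generalizing a with
  | zero =>
    rw [PySem.List.pyRange_one_eq_nil (by omega : b ≤ a),
        PySem.List.pyRange_one_eq_nil (by omega : c + b ≤ c + a)]
    simp
  | succ n ih =>
    have hab : a < b := by omega
    rw [PySem.List.pyRange_one_cons hab, PySem.List.pyRange_one_cons (by omega : c + a < c + b)]
    simp only [List.map_cons]
    rw [show c + a + 1 = c + (a + 1) by ring, ih (a + 1) (by omega)]

-- splitting a range of multiples of k into blocks of length k
lemma pv_pyRange_split (k : Int) (hk : 0 < k) (a b : Int) :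
    PySem.List.pyRange (k * a) (k * b) =
      (PySem.List.pyRange a b).flatMap (fun h => (PySem.List.pyRange 0 k).map (fun r => k * h + r)) := by
  obtain ⟨n, hn⟩ : ∃ n, (b - a).toNat = n := ⟨_, rfl⟩
  induction n generalizing a with
  | zero =>
    rw [PySem.List.pyRange_one_eq_nil (by omega : b ≤ a),
        PySem.List.pyRange_one_eq_nil (mul_le_mul_of_nonneg_left (by omega : b ≤ a) hk.le)]
    simp
  | succ n ih =>
    have hab : a < b := by omega
    rw [PySem.List.pyRange_one_cons hab, List.flatMap_cons]
    have h1 : k * a ≤ k * (a + 1) := by nlinarith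
    have h2 : k * (a + 1) ≤ k * b := by nlinarith
    rw [PySem.List.pyRange_one_append (k * a) (k * (a + 1)) (k * b) h1 h2]
    have hblock : PySem.List.pyRange (k * a) (k * (a + 1)) =
        (PySem.List.pyRange 0 k).map (fun r => k * a + r) := by
      have h := pv_pyRange_shift (k * a) 0 k
      rw [add_zero] at h
      rw [show k * (a + 1) = k * a + k by ring]
      exact h
    rw [hblock, ih (a + 1) (by omega)]

-- the flat [0, 3600) range as minute/second blocks
lemma pv_inner :
    PySem.List.pyRange 0 3600 =
      (PySem.List.pyRange 0 60).flatMap (fun m => (PySem.List.pyRange 0 60).map (fun s => 60 * m + s)) := by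
  have h := pv_pyRange_split 60 (by norm_num) 0 60
  norm_num at h
  exact h

-- divmod recovery of the components from the flat second count
lemma pv_decomp (h m s : Int) (hm0 : 0 ≤ m) (hm1 : m < 60) (hs0 : 0 ≤ s) (hs1 : s < 60) :
    PySem.Int.floordiv (3600 * h + (60 * m + s)) 3600 = h ∧
    PySem.Int.mod (3600 * h + (60 * m + s)) 3600 = 60 * m + s ∧
    PySem.Int.floordiv (60 * m + s) 60 = m ∧
    PySem.Int.mod (60 * m + s) 60 = s := by
  have hd1 : PySem.Int.floordiv (3600 * h + (60 * m + s)) 3600 = h := by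
    rw [PySem.Int.floordiv_eq_iff_of_pos (by norm_num)]
    constructor <;> nlinarith
  have hr1 := PySem.Int.floordiv_mul_add_mod (3600 * h + (60 * m + s)) 3600
  rw [hd1] at hr1
  have hd2 : PySem.Int.floordiv (60 * m + s) 60 = m := by
    rw [PySem.Int.floordiv_eq_iff_of_pos (by norm_num)]
    constructor <;> nlinarith
  have hr2 := PySem.Int.floordiv_mul_add_mod (60 * m + s) 60
  rw [hd2] at hr2
  exact ⟨hd1, by omega, hd2, by omega⟩

-- A as a nested flatMap over components
lemma pv_A_eq (min max : Int) :
    getAllTimes min max =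
      (PySem.List.pyRange min max).flatMap (fun h =>
        (PySem.List.pyRange 0 60).flatMap (fun m =>
          (PySem.List.pyRange 0 60).map (fun s =>
            if h = 0 then String.ofList (pvPad2 m ++ ':' :: pvPad2 s)
            else String.ofList (pvPad2 h ++ ':' :: pvPad2 m ++ ':' :: pvPad2 s)))) := by
  simp only [getAllTimes, PySem.List.foldl_append_singleton_eq_map,
    PySem.List.foldl_append_eq_flatMap, List.nil_append]

-- B as a map over the flat range of total seconds
lemma pv_B_eq (min max : Int) :
    getAllTimes_alt min max =
      (PySem.List.pyRange (min * 3600) (max * 3600)).map (fun total =>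
        pvJStr (PySem.Int.floordiv total 3600)
          (PySem.Int.floordiv (PySem.Int.mod total 3600) 60)
          (PySem.Int.mod (PySem.Int.mod total 3600) 60)) := by
  simp only [getAllTimes_alt, pvJStr, PySem.List.foldl_append_singleton_eq_map, List.nil_append]

-- ===== VERDICT (by name: the statement is the Claim_ definition above) =====
theorem getAllTimes_spec : Claim_equal_getAllTimes := by
  intro min max _
  show getAllTimes min max = getAllTimes_alt min max
  rw [pv_A_eq, pv_B_eq, mul_comm min 3600, mul_comm max 3600,
    pv_pyRange_split 3600 (by norm_num) min max, List.map_flatMap]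
  refine List.flatMap_congr (fun h _ => ?_)
  rw [pv_inner, List.map_flatMap, List.map_flatMap]
  refine List.flatMap_congr (fun m hm => ?_)
  rw [List.map_map, List.map_map]
  refine List.map_congr_left (fun s hs => ?_)
  rw [PySem.List.mem_pyRange_one] at hm hs
  obtain ⟨hd1, hr1, hd2, hr2⟩ := pv_decomp h m s hm.1 hm.2 hs.1 hs.2
  simp only [Function.comp_apply]
  rw [hd1, hr1, hd2, hr2, pv_join_eq]
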